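-- pv_equiv track=rewrite | github.com/pranavdes/Test | Roster.py | parse_day_descriptor
-- ===== SOURCE A (Python) =====
-- def parse_day_descriptor(descriptor):
--     """
--     Parses a day descriptor string (e.g., "1st Working Tuesday" or "Last Fri")
--     and returns a tuple (occurrence, weekday).
--     - occurrence: A string like "1st" or "last" indicating which occurrence of the day.
--     - weekday: A normalized day string (e.g., "mon" for Monday).
--     If the descriptor cannot be parsed, returns (None, None).
--     """
--     descriptor = descriptor.strip().lower()  # Clean up the descriptor.
--     tokens = descriptor.split()              # Split into individual words.
--     valid_occurrences = {"1st", "2nd", "3rd", "4th", "5th", "last"}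
--     valid_short_days = {"mon", "tue", "wed", "thu", "fri"}
--     occ, wday = None, None
--     for token in tokens:
--         if token in valid_occurrences:
--             occ = token                     # Set occurrence if token is valid.
--         else:
--             for day in valid_short_days:
--                 if token.startswith(day):
--                     wday = day            # Set weekday if token starts with a valid day.
--                     break
--     return (occ, wday) if occ and wday else (None, None)
-- ===== SOURCE B (Python) =====
-- def parse_day_descriptor(descriptor):
--     tokens = descriptor.strip().lower().split()
--     occurrences = ("1st", "2nd", "3rd", "4th", "5th", "last")
--     days = ("mon", "tue", "wed", "thu", "fri")
--     occ = next((t for t in reversed(tokens) if t in occurrences), None)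
--     wday = next((d for t in reversed(tokens) for d in days if t.startswith(d)), None)
--     return (occ, wday) if occ and wday else (None, None)
-- ===== Notes on version B (the rewrite author's own statement) =====
-- stated objective: simpler
-- what changed: Replaces A's single fold that threads an interleaved (occ, wday) state through nested loops with two independent declarative searches over the reversed token list (last valid occurrence token, last day-prefixed token).
import Mathlib
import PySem

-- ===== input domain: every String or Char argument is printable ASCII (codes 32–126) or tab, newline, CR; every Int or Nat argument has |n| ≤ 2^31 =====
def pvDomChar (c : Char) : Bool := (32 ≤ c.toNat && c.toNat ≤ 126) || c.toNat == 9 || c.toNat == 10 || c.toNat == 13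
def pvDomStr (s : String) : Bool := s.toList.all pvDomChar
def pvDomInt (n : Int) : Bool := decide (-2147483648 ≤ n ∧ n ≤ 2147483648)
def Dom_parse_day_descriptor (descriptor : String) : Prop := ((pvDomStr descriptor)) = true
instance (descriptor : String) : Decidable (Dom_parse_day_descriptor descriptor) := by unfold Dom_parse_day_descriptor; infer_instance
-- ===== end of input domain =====

-- B replaces A's single fold with interleaved state by two independent reversed-scan
-- searches (find the last occurrence token, find the last day-prefixed token); objective: simpler.

-- ===== PORT A =====
-- the set literals {"1st",...} / {"mon",...}; Python set iteration order is irrelevant here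
-- because a token starts with at most one of the equal-length day prefixes
def pddA_occs : List String := ["1st", "2nd", "3rd", "4th", "5th", "last"]
def pddA_days : List String := ["mon", "tue", "wed", "thu", "fri"]

-- A's loop body: 'if token in valid_occurrences: occ = token else: for day …: if startswith: wday = day; break'
def pddA_step (s : Option String × Option String) (token : String) : Option String × Option String :=
  if pddA_occs.contains token then (some token, s.2)
  else
    match pddA_days.find? (fun day => PySem.Str.startswith token day) with
    | some day => (s.1, some day)
    | none => s

def parse_day_descriptor (descriptor : String) : Option String × Option String :=
  let descriptor := PySem.Str.lower (PySem.Str.strip descriptor)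
  let tokens := PySem.Str.split₀ descriptor
  let st := tokens.foldl pddA_step (none, none)
  -- '(occ, wday) if occ and wday else (None, None)': occ/wday only ever hold nonempty
  -- strings, so Python truthiness is exactly is-some
  match st with
  | (some o, some w) => (some o, some w)
  | _ => (none, none)

-- ===== PORT B =====
def parse_day_descriptor_alt (descriptor : String) : Option String × Option String :=
  let tokens := PySem.Str.split₀ (PySem.Str.lower (PySem.Str.strip descriptor))
  let occurrences : List String := ["1st", "2nd", "3rd", "4th", "5th", "last"]
  let days : List String := ["mon", "tue", "wed", "thu", "fri"]
  -- next((t for t in reversed(tokens) if t in occurrences), None)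
  let occ := tokens.reverse.find? (fun t => occurrences.contains t)
  -- next((d for t in reversed(tokens) for d in days if t.startswith(d)), None)
  let wday := tokens.reverse.findSome? (fun t => days.find? (fun d => PySem.Str.startswith t d))
  -- '(occ, wday) if occ and wday else (None, None)': both only ever hold nonempty strings,
  -- so Python truthiness is exactly is-some
  if occ.isSome && wday.isSome then (occ, wday) else (none, none)

-- ===== PRECONDITION & SPEC =====
def Spec_parse_day_descriptor (descriptor : String) (out : Option String × Option String) : Prop := out = parse_day_descriptor_alt descriptor
instance (descriptor : String) (out : Option String × Option String) : Decidable (Spec_parse_day_descriptor descriptor out) := by unfold Spec_parse_day_descriptor; infer_instance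

-- ===== CLAIM (what is proved, stated in full; the proofs are below) =====
def Claim_equal_parse_day_descriptor : Prop := ∀ (descriptor : String), Dom_parse_day_descriptor descriptor → Spec_parse_day_descriptor descriptor (parse_day_descriptor descriptor)

-- ===== LEMMAS AND PROOFS =====

-- a valid occurrence token never starts with a day prefix
theorem pdd_occ_no_day (t : String) (h : pddA_occs.contains t = true) :
    pddA_days.find? (fun day => PySem.Str.startswith t day) = none := by
  simp only [pddA_occs, List.contains_eq_mem, List.mem_cons, decide_eq_true_eq,
    List.not_mem_nil, or_false] at h
  rcases h with h | h | h | h | h | h <;> subst h <;> decide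

-- A's loop body updates the occurrence slot exactly like a one-token search
theorem pdd_step_fst (s : Option String × Option String) (t : String) :
    (pddA_step s t).1 = (if pddA_occs.contains t then some t else none).or s.1 := by
  unfold pddA_step
  by_cases h : pddA_occs.contains t = true
  · rw [if_pos h, if_pos h]; rfl
  · rw [if_neg h, if_neg h]
    cases hf : pddA_days.find? (fun day => PySem.Str.startswith t day) <;> rfl

-- A's loop body updates the weekday slot exactly like a one-token search
theorem pdd_step_snd (s : Option String × Option String) (t : String) :
    (pddA_step s t).2 = (pddA_days.find? (fun d => PySem.Str.startswith t d)).or s.2 := by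
  unfold pddA_step
  by_cases h : pddA_occs.contains t = true
  · rw [if_pos h, pdd_occ_no_day t h]; rfl
  · rw [if_neg h]
    cases hf : pddA_days.find? (fun day => PySem.Str.startswith t day) <;> rfl

-- first component of A's fold = last occurrence token (reversed-scan first match)
theorem pdd_fold_fst (ts : List String) (s : Option String × Option String) :
    (ts.foldl pddA_step s).1 = (ts.reverse.find? (fun t => pddA_occs.contains t)).or s.1 := by
  induction ts generalizing s with
  | nil => rfl
  | cons t ts ih =>
    simp only [List.foldl_cons, ih, pdd_step_fst, List.reverse_cons, List.find?_append,
      Option.or_assoc]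
    congr 1
    cases h : pddA_occs.contains t <;> simp [List.find?, -List.contains_eq_mem, h]

-- second component of A's fold = day prefix of the last day-prefixed token
theorem pdd_fold_snd (ts : List String) (s : Option String × Option String) :
    (ts.foldl pddA_step s).2 =
      (ts.reverse.findSome? (fun t => pddA_days.find? (fun d => PySem.Str.startswith t d))).or s.2 := by
  induction ts generalizing s with
  | nil => rfl
  | cons t ts ih =>
    simp only [List.foldl_cons, ih, pdd_step_snd, List.reverse_cons, List.findSome?_append,
      List.findSome?_singleton, Option.or_assoc]

-- ===== VERDICT (by name: the statement is the Claim_ definition above) =====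
theorem parse_day_descriptor_spec : Claim_equal_parse_day_descriptor := by
  intro descriptor _
  unfold Spec_parse_day_descriptor parse_day_descriptor
  show _ = parse_day_descriptor_alt descriptor
  unfold parse_day_descriptor_alt
  simp only [show (["1st", "2nd", "3rd", "4th", "5th", "last"] : List String) = pddA_occs from rfl,
    show (["mon", "tue", "wed", "thu", "fri"] : List String) = pddA_days from rfl]
  set ts := PySem.Str.split₀ (PySem.Str.lower (PySem.Str.strip descriptor)) with hts
  have h1 := pdd_fold_fst ts (none, none)
  have h2 := pdd_fold_snd ts (none, none)
  simp only [Option.or_none] at h1 h2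
  rcases hst : ts.foldl pddA_step (none, none) with ⟨o, w⟩
  rw [hst] at h1 h2
  simp only at h1 h2
  rw [← h1, ← h2]
  cases o <;> cases w <;> rfl
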